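-- pv_equiv track=rewrite | github.com/pypi-data/pypi-mirror-396 | packages/makefast/makefast-2.2.3.tar.gz/makefast-2.2.3/makefast/utils/common.py | convert_to_snake_case
-- ===== SOURCE A (Python) =====
-- def convert_to_snake_case(input_string):
--     """
--     Converts a string to snake case, handling camelCase, PascalCase, spaces, and hyphens.
--
--     Parameters:
--     input_string (str): The string to be converted.
--
--     Returns:
--     str: The string in snake case.
--     """
--     # Add underscore before any uppercase letter
--     result = ""
--     for i, char in enumerate(input_string):
--         if char.isupper() and i > 0:
--             result += "_" + char.lower()
--         else:
--             result += char.lower()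
--
--     # Replace spaces and hyphens with underscores
--     result = result.replace(" ", "_").replace("-", "_")
--
--     # Remove any consecutive underscores and trim
--     while "__" in result:
--         result = result.replace("__", "_")
--     result = result.strip("_")
--
--     return result
-- ===== SOURCE B (Python) =====
-- def convert_to_snake_case(input_string):
--     out = []
--     pending = False
--     for c in input_string:
--         if c in " -_":
--             pending = True
--         else:
--             if c.isupper():
--                 pending = True
--             if pending and out:
--                 out.append("_")
--             out.append(c.lower())
--             pending = False
--     return "".join(out)
-- ===== Notes on version B (the rewrite author's own statement) =====
-- stated objective: alternative
-- what changed: Replaces A's build-then-rescan pipeline (char-by-char concatenation, two global replace passes, a repeated "__"-collapsing replace loop, then strip) with a single left-to-right pass that keeps a pending-separator flag and emits each output character exactly once.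
import Mathlib
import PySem

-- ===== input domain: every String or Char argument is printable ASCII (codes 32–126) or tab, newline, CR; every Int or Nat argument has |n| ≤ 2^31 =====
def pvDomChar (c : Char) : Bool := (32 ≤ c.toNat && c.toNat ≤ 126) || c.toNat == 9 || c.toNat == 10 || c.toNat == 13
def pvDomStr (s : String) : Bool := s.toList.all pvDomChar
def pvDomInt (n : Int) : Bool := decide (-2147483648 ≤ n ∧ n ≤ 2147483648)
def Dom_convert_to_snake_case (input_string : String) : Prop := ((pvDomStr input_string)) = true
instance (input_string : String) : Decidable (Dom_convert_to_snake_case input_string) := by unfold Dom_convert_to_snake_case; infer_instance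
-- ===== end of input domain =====

-- B replaces A's build-then-rescan pipeline (repeated global "__"-replace passes plus strip)
-- by a single left-to-right pass with a pending-separator flag; same return value, one traversal
-- (a structurally different algorithm; measured runtime is comparable).

-- ===== PORT A =====
-- helper lemmas needed by collapseA's termination proof: Python's s.replace("__", "_")
-- characterised as the structural recursion ruu, which strictly shrinks while "__" occurs.
def ruu : List Char → List Char
  | [] => []
  | [c] => [c]
  | c1 :: c2 :: t => if c1 = '_' ∧ c2 = '_' then '_' :: ruu t else c1 :: ruu (c2 :: t)
termination_by l => l.length

lemma go_uu : ∀ (fuel : Nat) (l acc : List Char), l.length ≤ fuel →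
    PySem.Chars.replace.go ['_','_'] ['_'] fuel l acc = acc.reverse ++ ruu l := by
  intro fuel
  induction fuel with
  | zero =>
    intro l acc h
    have : l = [] := by cases l <;> simp_all
    subst this; simp [PySem.Chars.replace.go, ruu]
  | succ n ih =>
    intro l acc h
    match l with
    | [] => simp [PySem.Chars.replace.go, ruu]
    | [c] =>
      rw [PySem.Chars.replace.go]
      have hp : (['_','_'] : List Char).isPrefixOf [c] = false := by
        simp [List.isPrefixOf]
      rw [hp]
      simp only [Bool.false_eq_true, if_false]
      rw [ih [] (c :: acc) (by simp)]
      simp [ruu]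
    | c1 :: c2 :: t =>
      rw [PySem.Chars.replace.go]
      by_cases hc : c1 = '_' ∧ c2 = '_'
      · obtain ⟨h1, h2⟩ := hc; subst h1; subst h2
        have hp : (['_','_'] : List Char).isPrefixOf ('_' :: '_' :: t) = true := by
          simp [List.isPrefixOf]
        rw [hp]
        simp only [if_true]
        simp only [List.length_cons, List.drop_succ_cons, List.drop_zero, List.length_nil, Nat.zero_add]
        rw [ih t (['_'].reverse ++ acc) (by simp at h ⊢; omega)]
        rw [ruu]
        simp
      · have hp : (['_','_'] : List Char).isPrefixOf (c1 :: c2 :: t) = false := by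
          simp [List.isPrefixOf]
          intro h1 h2; exact hc ⟨h1.symm, h2.symm⟩
        rw [hp]
        simp only [Bool.false_eq_true, if_false]
        rw [ih (c2 :: t) (c1 :: acc) (by simp at h ⊢; omega)]
        rw [ruu, if_neg hc]
        simp

lemma replace_uu (x : List Char) : PySem.Chars.replace x ['_','_'] ['_'] = ruu x := by
  rw [PySem.Chars.replace]
  simp only [List.isEmpty_cons, Bool.false_eq_true, if_false]
  exact go_uu x.length x [] le_rfl

lemma ruu_length_le (x : List Char) : (ruu x).length ≤ x.length := by
  fun_induction ruu <;> simp_all <;> omega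

lemma ruu_length_lt (x : List Char) (h : (['_','_'] : List Char) <:+: x) :
    (ruu x).length < x.length := by
  fun_induction ruu with
  | case1 => simp at h
  | case2 c =>
    exfalso
    have := h.length_le; simp at this
  | case3 c1 c2 t hc =>
    have := ruu_length_le t
    simp; omega
  | case4 c1 c2 t hc ih =>
    have h' : (['_','_'] : List Char) <:+: (c2 :: t) := by
      rcases (List.infix_cons_iff).mp h with h1 | h2
      · exfalso
        rcases h1 with ⟨r, hr⟩
        simp at hr
        exact hc ⟨hr.1.symm, hr.2.1.symm⟩
      · exact h2
    have := ih h'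
    simpa using this

-- Python: while "__" in result: result = result.replace("__", "_")
def collapseA (x : List Char) : List Char :=
  if h : PySem.Chars.isIn ['_','_'] x = true then
    collapseA (PySem.Chars.replace x ['_','_'] ['_'])
  else x
termination_by x.length
decreasing_by
  rw [replace_uu]
  exact ruu_length_lt x ((PySem.Chars.isIn_iff_infix _ _).mp h)

def convert_to_snake_case (input_string : String) : String :=
  -- result = ""; for i, char in enumerate(input_string): ...
  let result : List Char :=
    (PySem.List.enumerate input_string.toList 0).foldl
      (fun acc ic =>
        if PySem.Chars.isupper ic.2 && decide ((0:Int) < ic.1) then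
          acc ++ ['_', PySem.Chars.lowerChar ic.2]
        else
          acc ++ [PySem.Chars.lowerChar ic.2]) []
  -- result = result.replace(" ", "_").replace("-", "_")
  let result := PySem.Chars.replace result [' '] ['_']
  let result := PySem.Chars.replace result ['-'] ['_']
  -- while "__" in result: result = result.replace("__", "_")
  let result := collapseA result
  -- result.strip("_")
  String.mk (PySem.Chars.stripChars result ['_'])

-- ===== PORT B =====
def snakeStep (st : List Char × Bool) (c : Char) : List Char × Bool :=
  if c = ' ' ∨ c = '-' ∨ c = '_' then (st.1, true)
  else
    let pending := st.2 || PySem.Chars.isupper c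
    if pending && !st.1.isEmpty then (st.1 ++ ['_', PySem.Chars.lowerChar c], false)
    else (st.1 ++ [PySem.Chars.lowerChar c], false)

def convert_to_snake_case_alt (input_string : String) : String :=
  String.mk (input_string.toList.foldl snakeStep ([], false)).1

-- ===== PRECONDITION & SPEC =====
def Spec_convert_to_snake_case (input_string : String) (out : String) : Prop := out = convert_to_snake_case_alt input_string
instance (input_string : String) (out : String) : Decidable (Spec_convert_to_snake_case input_string out) := by unfold Spec_convert_to_snake_case; infer_instance

-- ===== CLAIM (what is proved, stated in full; the proofs are below) =====
def Claim_equal_convert_to_snake_case : Prop := ∀ (input_string : String), Dom_convert_to_snake_case input_string → Spec_convert_to_snake_case input_string (convert_to_snake_case input_string)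

-- ===== LEMMAS AND PROOFS =====

-- single-character replace is a map
lemma go_single (a b : Char) : ∀ (fuel : Nat) (l acc : List Char), l.length ≤ fuel →
    PySem.Chars.replace.go [a] [b] fuel l acc = acc.reverse ++ l.map (fun c => if c = a then b else c) := by
  intro fuel
  induction fuel with
  | zero =>
    intro l acc h
    have : l = [] := by cases l <;> simp_all
    subst this; simp [PySem.Chars.replace.go]
  | succ n ih =>
    intro l acc h
    match l with
    | [] => simp [PySem.Chars.replace.go]
    | c :: t =>
      rw [PySem.Chars.replace.go]
      by_cases hc : c = a
      · subst hc
        have hp : ([c] : List Char).isPrefixOf (c :: t) = true := by simp [List.isPrefixOf]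
        rw [hp]
        simp only [if_true, List.length_cons, List.length_nil, Nat.zero_add, List.drop_succ_cons, List.drop_zero]
        rw [ih t ([b].reverse ++ acc) (by simp at h ⊢; omega)]
        simp
      · have hp : ([a] : List Char).isPrefixOf (c :: t) = false := by
          simp [List.isPrefixOf]; exact fun h' => hc h'.symm
        rw [hp]
        simp only [Bool.false_eq_true, if_false]
        rw [ih t (c :: acc) (by simp at h ⊢; omega)]
        simp [hc]

lemma replace_single (a b : Char) (x : List Char) :
    PySem.Chars.replace x [a] [b] = x.map (fun c => if c = a then b else c) := by
  rw [PySem.Chars.replace]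
  simp only [List.isEmpty_cons, Bool.false_eq_true, if_false]
  exact go_single a b x.length x [] le_rfl

-- the canonical collapse of consecutive underscores
def squeeze : List Char → List Char
  | [] => []
  | [c] => [c]
  | c1 :: c2 :: t => if c1 = '_' ∧ c2 = '_' then squeeze (c2 :: t) else c1 :: squeeze (c2 :: t)
termination_by l => l.length

lemma squeeze_fix (x : List Char) (h : ¬ (['_','_'] : List Char) <:+: x) : squeeze x = x := by
  fun_induction squeeze with
  | case1 => rfl
  | case2 c => rfl
  | case3 c1 c2 t hc =>
    exfalso; apply h
    obtain ⟨h1, h2⟩ := hc; subst h1; subst h2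
    exact ⟨[], t, rfl⟩
  | case4 c1 c2 t hc ih =>
    rw [ih (fun h' => h (h'.trans (List.suffix_cons c1 (c2::t)).isInfix))]

lemma squeeze_cons_ruu (c : Char) (t : List Char) : squeeze (c :: ruu t) = squeeze (c :: t) := by
  fun_induction ruu generalizing c with
  | case1 => rfl
  | case2 d => rfl
  | case3 c1 c2 t' hc ih =>
    obtain ⟨h1, h2⟩ := hc; subst h1; subst h2
    by_cases hcu : c = '_'
    · subst hcu
      rw [show squeeze ('_' :: '_' :: ruu t') = squeeze ('_' :: ruu t') from by
            rw [squeeze]; simp,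
          ih '_',
          show squeeze ('_' :: '_' :: '_' :: t') = squeeze ('_' :: '_' :: t') from by
            rw [squeeze]; simp,
          show squeeze ('_' :: '_' :: t') = squeeze ('_' :: t') from by
            rw [squeeze]; simp]
    · rw [show squeeze (c :: '_' :: ruu t') = c :: squeeze ('_' :: ruu t') from by
            rw [squeeze]; simp [hcu],
          ih '_',
          show squeeze (c :: '_' :: '_' :: t') = c :: squeeze ('_' :: '_' :: t') from by
            rw [squeeze]; simp [hcu],
          show squeeze ('_' :: '_' :: t') = squeeze ('_' :: t') from by
            rw [squeeze]; simp]
  | case4 c1 c2 t' hc ih =>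
    by_cases hcu : c = '_' ∧ c1 = '_'
    · rw [show squeeze (c :: c1 :: ruu (c2 :: t')) = squeeze (c1 :: ruu (c2 :: t')) from by
            rw [squeeze, if_pos hcu],
          ih c1,
          show squeeze (c :: c1 :: c2 :: t') = squeeze (c1 :: c2 :: t') from by
            rw [squeeze, if_pos hcu]]
    · rw [show squeeze (c :: c1 :: ruu (c2 :: t')) = c :: squeeze (c1 :: ruu (c2 :: t')) from by
            rw [squeeze, if_neg hcu],
          ih c1,
          show squeeze (c :: c1 :: c2 :: t') = c :: squeeze (c1 :: c2 :: t') from by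
            rw [squeeze, if_neg hcu]]

lemma squeeze_ruu (x : List Char) : squeeze (ruu x) = squeeze x := by
  match x with
  | [] => simp [ruu]
  | c :: t =>
    match t with
    | [] => simp [ruu]
    | c2 :: t' =>
      rw [ruu]
      by_cases hc : c = '_' ∧ c2 = '_'
      · rw [if_pos hc]
        obtain ⟨h1, h2⟩ := hc; subst h1; subst h2
        rw [squeeze_cons_ruu '_' t',
            show squeeze ('_' :: '_' :: t') = squeeze ('_' :: t') from by rw [squeeze]; simp]
      · rw [if_neg hc, squeeze_cons_ruu c (c2 :: t')]

lemma collapseA_eq_squeeze (x : List Char) : collapseA x = squeeze x := by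
  fun_induction collapseA with
  | case1 x h ih =>
    rw [ih, replace_uu, squeeze_ruu]
  | case2 x h =>
    rw [squeeze_fix]
    intro h'
    exact h ((PySem.Chars.isIn_iff_infix _ _).mpr h')

lemma squeeze_uu_cons (t : List Char) : squeeze ('_' :: '_' :: t) = squeeze ('_' :: t) := by
  rw [squeeze]; simp

lemma squeeze_cons_ne (c : Char) (hc : c ≠ '_') (t : List Char) :
    squeeze (c :: t) = c :: squeeze t := by
  match t with
  | [] => simp [squeeze]
  | a :: t' => rw [squeeze, if_neg (by simp [hc])]

-- strip("_") via Mathlib's dropWhile / rdropWhile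
def pU : Char → Bool := fun c => decide (c = '_')

lemma stripChars_underscore (s : List Char) :
    PySem.Chars.stripChars s ['_'] = List.rdropWhile pU (List.dropWhile pU s) := by
  have hp : (fun c => (['_'] : List Char).contains c) = pU := by
    funext c; by_cases hc : c = '_' <;> simp [hc, pU]
  simp only [PySem.Chars.stripChars, List.rdropWhile, hp]

lemma rdropWhile_mid (y w : List Char) (c : Char) (hc : pU c = false) :
    List.rdropWhile pU (y ++ c :: w) = y ++ c :: List.rdropWhile pU w := by
  induction w using List.reverseRecOn with
  | nil => simpa [hc] using List.rdropWhile_concat pU y c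
  | append_singleton w d ih =>
    by_cases hd : pU d = true
    · rw [show y ++ c :: (w ++ [d]) = (y ++ c :: w) ++ [d] by simp,
          List.rdropWhile_concat, if_pos hd, ih,
          List.rdropWhile_concat, if_pos hd]
    · rw [show y ++ c :: (w ++ [d]) = (y ++ c :: w) ++ [d] by simp,
          List.rdropWhile_concat, if_neg hd,
          List.rdropWhile_concat, if_neg hd]
      simp

lemma dropWhile_squeeze_underscore (t : List Char) :
    List.dropWhile pU (squeeze ('_' :: t)) = List.dropWhile pU (squeeze t) := by
  match t with
  | [] => simp [squeeze, pU]
  | a :: t' =>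
    by_cases ha : a = '_'
    · subst ha; rw [squeeze_uu_cons]
    · rw [show squeeze ('_' :: a :: t') = '_' :: squeeze (a :: t') from by
            rw [squeeze, if_neg (by simp [ha])]]
      simp [pU]

-- the per-character expansion performed by A's first pass + separator replacement
def emCh (c : Char) : List Char :=
  if c = ' ' ∨ c = '-' ∨ c = '_' then ['_']
  else if PySem.Chars.isupper c then ['_', PySem.Chars.lowerChar c]
  else [c]

lemma lowerChar_upper_ne (c : Char) (h : PySem.Chars.isupper c = true) :
    PySem.Chars.lowerChar c ≠ ' ' ∧ PySem.Chars.lowerChar c ≠ '-' ∧ PySem.Chars.lowerChar c ≠ '_' := by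
  simp [PySem.Chars.isupper] at h
  have h1 : 65 ≤ c.toNat := h.1
  have h2 : c.toNat ≤ 90 := h.2
  simp only [PySem.Chars.lowerChar, PySem.Chars.isupper]
  rw [if_pos (by simpa [PySem.Chars.isupper] using h)]
  refine ⟨?_, ?_, ?_⟩ <;>
  · intro he
    have ht := congrArg Char.toNat he
    rw [Char.toNat_ofNat] at ht
    rw [if_pos (show (c.toNat + 32).isValidChar from Or.inl (by omega))] at ht
    simp at ht
    omega

lemma lowerChar_eq_self (c : Char) (h : PySem.Chars.isupper c = false) :
    PySem.Chars.lowerChar c = c := by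
  simp [PySem.Chars.lowerChar, h]

-- ---- B's fold computes strip(squeeze(expansion)) ----

lemma squeeze_cons₂ (a b : Char) (t : List Char) (h : ¬ (a = '_' ∧ b = '_')) :
    squeeze (a :: b :: t) = a :: squeeze (b :: t) := by
  rw [squeeze, if_neg h]

lemma rdropWhile_cons₁ (c : Char) (w : List Char) (hc : c ≠ '_') :
    List.rdropWhile pU (c :: w) = c :: List.rdropWhile pU w := by
  simpa using rdropWhile_mid [] w c (by simp [pU, hc])

lemma rdropWhile_cons₂ (c : Char) (w : List Char) (hc : c ≠ '_') :
    List.rdropWhile pU ('_' :: c :: w) = '_' :: c :: List.rdropWhile pU w := by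
  simpa using rdropWhile_mid ['_'] w c (by simp [pU, hc])

lemma runB : ∀ (cs out : List Char) (pending : Bool), out ≠ [] →
    (cs.foldl snakeStep (out, pending)).1 =
      out ++ List.rdropWhile pU (squeeze ((if pending then ['_'] else []) ++ cs.flatMap emCh)) := by
  intro cs
  induction cs with
  | nil =>
    intro out pending h
    cases pending <;> simp [squeeze, List.rdropWhile, pU]
  | cons c cs ih =>
    intro out pending h
    rw [List.foldl_cons]
    by_cases hsep : c = ' ' ∨ c = '-' ∨ c = '_'
    · rw [show snakeStep (out, pending) c = (out, true) from by simp [snakeStep, hsep]]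
      rw [ih out true h]
      have hem : emCh c = ['_'] := by rw [emCh, if_pos hsep]
      cases pending <;>
        simp only [List.flatMap_cons, hem, Bool.false_eq_true, if_false, if_pos trivial,
          List.nil_append, List.singleton_append]
      rw [squeeze_uu_cons]
    · have hcu : c ≠ '_' := by intro hh; exact hsep (Or.inr (Or.inr hh))
      by_cases hup : PySem.Chars.isupper c = true
      · have hl : PySem.Chars.lowerChar c ≠ '_' := (lowerChar_upper_ne c hup).2.2
        rw [show snakeStep (out, pending) c = (out ++ ['_', PySem.Chars.lowerChar c], false) from by
              simp [snakeStep, hsep, hup, h]]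
        rw [ih _ false (by simp)]
        have hem : emCh c = ['_', PySem.Chars.lowerChar c] := by
          rw [emCh, if_neg hsep, if_pos hup]
        cases pending <;>
          simp only [List.flatMap_cons, hem, Bool.false_eq_true, if_false, if_pos trivial,
            List.nil_append, List.singleton_append, List.cons_append]
        · rw [squeeze_cons₂ _ _ _ (by simp [hl]), squeeze_cons_ne _ hl,
              rdropWhile_cons₂ _ _ hl]
          simp
        · rw [squeeze_uu_cons, squeeze_cons₂ _ _ _ (by simp [hl]), squeeze_cons_ne _ hl,
              rdropWhile_cons₂ _ _ hl]
          simp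
      · have hup' : PySem.Chars.isupper c = false := by simpa using hup
        have hlc : PySem.Chars.lowerChar c = c := lowerChar_eq_self c hup'
        have hem : emCh c = [c] := by rw [emCh, if_neg hsep, if_neg (by simp [hup'])]
        cases pending
        · rw [show snakeStep (out, false) c = (out ++ [PySem.Chars.lowerChar c], false) from by
                simp [snakeStep, hsep, hup']]
          rw [ih _ false (by simp)]
          simp only [List.flatMap_cons, hem, Bool.false_eq_true, if_false, hlc,
            List.nil_append, List.singleton_append, List.cons_append]
          rw [squeeze_cons_ne _ hcu, rdropWhile_cons₁ _ _ hcu]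
          simp
        · rw [show snakeStep (out, true) c = (out ++ ['_', PySem.Chars.lowerChar c], false) from by
                simp [snakeStep, hsep, h]]
          rw [ih _ false (by simp)]
          simp only [List.flatMap_cons, hem, Bool.false_eq_true, if_false, if_pos trivial, hlc,
            List.nil_append, List.singleton_append, List.cons_append]
          rw [squeeze_cons₂ _ _ _ (by simp [hcu]), squeeze_cons_ne _ hcu,
              rdropWhile_cons₂ _ _ hcu]
          simp

lemma headB : ∀ (cs : List Char) (pending : Bool),
    (cs.foldl snakeStep ([], pending)).1 =
      List.rdropWhile pU (List.dropWhile pU (squeeze (cs.flatMap emCh))) := by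
  intro cs
  induction cs with
  | nil => intro pending; simp [squeeze, List.rdropWhile]
  | cons c cs ih =>
    intro pending
    rw [List.foldl_cons]
    by_cases hsep : c = ' ' ∨ c = '-' ∨ c = '_'
    · rw [show snakeStep (([] : List Char), pending) c = ([], true) from by simp [snakeStep, hsep]]
      rw [ih true]
      have hem : emCh c = ['_'] := by rw [emCh, if_pos hsep]
      simp only [List.flatMap_cons, hem, List.singleton_append]
      rw [dropWhile_squeeze_underscore]
    · have hcu : c ≠ '_' := by intro hh; exact hsep (Or.inr (Or.inr hh))
      by_cases hup : PySem.Chars.isupper c = true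
      · have hl : PySem.Chars.lowerChar c ≠ '_' := (lowerChar_upper_ne c hup).2.2
        rw [show snakeStep (([] : List Char), pending) c = ([PySem.Chars.lowerChar c], false) from by
              simp [snakeStep, hsep, hup]]
        rw [runB cs [PySem.Chars.lowerChar c] false (by simp)]
        have hem : emCh c = ['_', PySem.Chars.lowerChar c] := by
          rw [emCh, if_neg hsep, if_pos hup]
        simp only [List.flatMap_cons, hem, Bool.false_eq_true, if_false,
          List.nil_append, List.singleton_append, List.cons_append]
        rw [squeeze_cons₂ _ _ _ (by simp [hl]), squeeze_cons_ne _ hl]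
        rw [show List.dropWhile pU ('_' :: PySem.Chars.lowerChar c :: squeeze (cs.flatMap emCh)) =
              PySem.Chars.lowerChar c :: squeeze (cs.flatMap emCh) from by
              simp [pU, hl]]
        rw [rdropWhile_cons₁ _ _ hl]
      · have hup' : PySem.Chars.isupper c = false := by simpa using hup
        have hlc : PySem.Chars.lowerChar c = c := lowerChar_eq_self c hup'
        rw [show snakeStep (([] : List Char), pending) c = ([PySem.Chars.lowerChar c], false) from by
              simp [snakeStep, hsep]]
        rw [runB cs [PySem.Chars.lowerChar c] false (by simp)]
        have hem : emCh c = [c] := by rw [emCh, if_neg hsep, if_neg (by simp [hup'])]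
        simp only [List.flatMap_cons, hem, Bool.false_eq_true, if_false, hlc,
          List.nil_append, List.singleton_append, List.cons_append]
        rw [squeeze_cons_ne _ hcu]
        rw [show List.dropWhile pU (c :: squeeze (cs.flatMap emCh)) =
              c :: squeeze (cs.flatMap emCh) from by simp [pU, hcu]]
        rw [rdropWhile_cons₁ _ _ hcu]

-- ---- A's pipeline computes the same canonical value ----

lemma foldl_shape : ∀ (l : List (Int × Char)) (init : List Char),
    l.foldl
      (fun acc ic =>
        if PySem.Chars.isupper ic.2 && decide ((0:Int) < ic.1) then
          acc ++ ['_', PySem.Chars.lowerChar ic.2]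
        else acc ++ [PySem.Chars.lowerChar ic.2]) init
      = init ++ l.flatMap (fun ic =>
          if PySem.Chars.isupper ic.2 && decide ((0:Int) < ic.1) then
            ['_', PySem.Chars.lowerChar ic.2]
          else [PySem.Chars.lowerChar ic.2]) := by
  intro l
  induction l with
  | nil => intro init; simp
  | cons p l ih =>
    intro init
    simp only [List.foldl_cons, List.flatMap_cons]
    split <;> rw [ih] <;> simp

lemma enum_tail : ∀ (cs : List Char) (k : Int), 1 ≤ k →
    (PySem.List.enumerate cs k).flatMap (fun ic =>
        if PySem.Chars.isupper ic.2 && decide ((0:Int) < ic.1) then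
          ['_', PySem.Chars.lowerChar ic.2]
        else [PySem.Chars.lowerChar ic.2])
      = cs.flatMap (fun c =>
          if PySem.Chars.isupper c then ['_', PySem.Chars.lowerChar c]
          else [PySem.Chars.lowerChar c]) := by
  intro cs
  induction cs with
  | nil => intro k hk; simp [PySem.List.enumerate_nil]
  | cons c cs ih =>
    intro k hk
    rw [PySem.List.enumerate_cons, List.flatMap_cons, List.flatMap_cons, ih (k+1) (by omega)]
    have hd : decide ((0:Int) < k) = true := decide_eq_true (by omega)
    rw [hd]
    simp

-- per-character effect of the two single-character replaces on the first pass
lemma map_repl_em1 (c : Char) :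
    (((if PySem.Chars.isupper c then ['_', PySem.Chars.lowerChar c]
       else [PySem.Chars.lowerChar c]).map (fun d => if d = ' ' then '_' else d)).map
      (fun d => if d = '-' then '_' else d) = emCh c) := by
  by_cases hsep : c = ' ' ∨ c = '-' ∨ c = '_'
  · rcases hsep with rfl | rfl | rfl <;> decide
  · by_cases hup : PySem.Chars.isupper c = true
    · obtain ⟨h1, h2, h3⟩ := lowerChar_upper_ne c hup
      rw [if_pos hup, emCh, if_neg hsep, if_pos hup]
      simp [h1, h2]
    · have hup' : PySem.Chars.isupper c = false := by simpa using hup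
      have hlc : PySem.Chars.lowerChar c = c := lowerChar_eq_self c hup'
      rw [if_neg (by simp [hup']), emCh, if_neg hsep, if_neg (by simp [hup'])]
      have hc1 : c ≠ ' ' := fun hh => hsep (Or.inl hh)
      have hc2 : c ≠ '-' := fun hh => hsep (Or.inr (Or.inl hh))
      simp [hlc, hc1, hc2]

lemma A_list (l : List Char) :
    PySem.Chars.stripChars
      (collapseA
        (PySem.Chars.replace
          (PySem.Chars.replace
            ((PySem.List.enumerate l 0).foldl
              (fun acc ic =>
                if PySem.Chars.isupper ic.2 && decide ((0:Int) < ic.1) then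
                  acc ++ ['_', PySem.Chars.lowerChar ic.2]
                else acc ++ [PySem.Chars.lowerChar ic.2]) [])
            [' '] ['_'])
          ['-'] ['_'])) ['_']
      = List.rdropWhile pU (List.dropWhile pU (squeeze (l.flatMap emCh))) := by
  rw [stripChars_underscore, collapseA_eq_squeeze, replace_single, replace_single]
  match l with
  | [] => simp [PySem.List.enumerate_nil, squeeze, List.rdropWhile]
  | c :: cs =>
    rw [PySem.List.enumerate_cons, foldl_shape, List.flatMap_cons, List.nil_append]
    have h0 : (decide ((0:Int) < 0)) = false := by decide
    simp only [zero_add]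
    rw [enum_tail cs 1 (by omega)]
    simp only [h0, Bool.and_false, Bool.false_eq_true, if_false]
    rw [List.map_append, List.map_append, List.map_flatMap, List.map_flatMap]
    simp only [map_repl_em1, List.flatMap_cons]
    -- head character: [lowerChar c] maps to the head of emCh c up to one leading '_'
    by_cases hsep : c = ' ' ∨ c = '-' ∨ c = '_'
    · have hem : emCh c = ['_'] := by rw [emCh, if_pos hsep]
      have hY : (([PySem.Chars.lowerChar c].map (fun d => if d = ' ' then '_' else d)).map
          (fun d => if d = '-' then '_' else d)) = ['_'] := by
        rcases hsep with rfl | rfl | rfl <;> decide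
      rw [hY, hem]
    · by_cases hup : PySem.Chars.isupper c = true
      · obtain ⟨h1, h2, h3⟩ := lowerChar_upper_ne c hup
        have hem : emCh c = ['_', PySem.Chars.lowerChar c] := by
          rw [emCh, if_neg hsep, if_pos hup]
        have hY : (([PySem.Chars.lowerChar c].map (fun d => if d = ' ' then '_' else d)).map
            (fun d => if d = '-' then '_' else d)) = [PySem.Chars.lowerChar c] := by
          simp [h1, h2]
        rw [hY, hem]
        simp only [List.cons_append, List.singleton_append]
        rw [dropWhile_squeeze_underscore]
      · have hup' : PySem.Chars.isupper c = false := by simpa using hup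
        have hlc : PySem.Chars.lowerChar c = c := lowerChar_eq_self c hup'
        have hem : emCh c = [c] := by rw [emCh, if_neg hsep, if_neg (by simp [hup'])]
        have hc1 : c ≠ ' ' := fun hh => hsep (Or.inl hh)
        have hc2 : c ≠ '-' := fun hh => hsep (Or.inr (Or.inl hh))
        have hY : (([PySem.Chars.lowerChar c].map (fun d => if d = ' ' then '_' else d)).map
            (fun d => if d = '-' then '_' else d)) = [c] := by
          simp [hlc, hc1, hc2]
        rw [hY, hem]

-- ===== VERDICT (by name: the statement is the Claim_ definition above) =====
theorem convert_to_snake_case_spec : Claim_equal_convert_to_snake_case := by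
  intro s _
  show convert_to_snake_case s = convert_to_snake_case_alt s
  have hA : convert_to_snake_case s
      = String.mk (List.rdropWhile pU (List.dropWhile pU (squeeze (s.toList.flatMap emCh)))) :=
    congrArg String.mk (A_list s.toList)
  have hB : convert_to_snake_case_alt s
      = String.mk (List.rdropWhile pU (List.dropWhile pU (squeeze (s.toList.flatMap emCh)))) :=
    congrArg String.mk (headB s.toList false)
  rw [hA, hB]
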